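-- pv_equiv track=rewrite | github.com/DanielBasic/SIMBA | api_MercadoLivre/getContent.py | find_start_end_indexes
-- ===== SOURCE A (Python) =====
-- def find_start_end_indexes(string, substring):
--     start_index = None
--     end_index = None
--
--     for i in range(len(string)):
--         if string[i:i + len(substring)] == substring:
--             if start_index is None:
--                 start_index = i
--             end_index = i + len(substring) - 1
--
--     return start_index, end_index
-- ===== SOURCE B (Python) =====
-- def find_start_end_indexes(string, substring):
--     start_index = None
--     end_index = None
--     m = len(substring)
--     for i in range(len(string)):
--         if string[i:i + m] == substring:
--             start_index = i
--             break
--     for i in range(len(string) - 1, -1, -1):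
--         if string[i:i + m] == substring:
--             end_index = i + m - 1
--             break
--     return start_index, end_index
-- ===== Notes on version B (the rewrite author's own statement) =====
-- stated objective: alternative
-- what changed: Replaces A's single exhaustive scan that keeps overwriting end_index with two directional passes that each stop at the first hit: a forward loop with break for the start index and a backward loop with break for the end index.
import Mathlib
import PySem

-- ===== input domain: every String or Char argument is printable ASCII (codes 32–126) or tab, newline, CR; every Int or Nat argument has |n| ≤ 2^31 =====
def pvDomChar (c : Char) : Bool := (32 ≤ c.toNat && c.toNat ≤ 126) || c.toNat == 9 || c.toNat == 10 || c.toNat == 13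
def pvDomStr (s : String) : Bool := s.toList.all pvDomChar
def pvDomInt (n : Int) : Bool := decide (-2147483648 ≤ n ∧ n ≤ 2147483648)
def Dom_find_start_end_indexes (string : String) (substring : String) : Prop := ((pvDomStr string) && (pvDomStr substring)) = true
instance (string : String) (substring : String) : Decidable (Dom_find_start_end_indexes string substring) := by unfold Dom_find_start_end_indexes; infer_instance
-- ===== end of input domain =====

-- B replaces A's exhaustive overwriting scan by two directional early-exit passes (forward for start, backward for end); same return value.

-- ===== PORT A =====
-- one pass over range(len(string)); slice test string[i:i+len(substring)] == substring; start set once, end overwritten each match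
def find_start_end_indexes (string : String) (substring : String) : Option Int × Option Int :=
  let s := string.toList
  let t := substring.toList
  (PySem.List.pyRange 0 (s.length : Int) 1).foldl
    (fun (st : Option Int × Option Int) i =>
      if PySem.List.slice s (some i) (some (i + (t.length : Int))) = t then
        ((if st.1 = none then some i else st.1), some (i + (t.length : Int) - 1))
      else st)
    (none, none)

-- ===== PORT B =====
-- forward loop with break: first index i in the given index list where the slice matches
def bFirst (s t : List Char) : List Int → Option Int
  | [] => none
  | i :: rest =>
    if PySem.List.slice s (some i) (some (i + (t.length : Int))) = t then some i
    else bFirst s t rest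

-- backward loop with break: first match in the countdown index list, returning i + len(substring) - 1
def bLastEnd (s t : List Char) : List Int → Option Int
  | [] => none
  | i :: rest =>
    if PySem.List.slice s (some i) (some (i + (t.length : Int))) = t then
      some (i + (t.length : Int) - 1)
    else bLastEnd s t rest

def find_start_end_indexes_alt (string : String) (substring : String) : Option Int × Option Int :=
  let s := string.toList
  let t := substring.toList
  (bFirst s t (PySem.List.pyRange 0 (s.length : Int) 1),
   bLastEnd s t (PySem.List.pyRange ((s.length : Int) - 1) (-1) (-1)))

-- ===== PRECONDITION & SPEC =====
def Spec_find_start_end_indexes (string : String) (substring : String) (out : Option Int × Option Int) : Prop := out = find_start_end_indexes_alt string substring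
instance (string : String) (substring : String) (out : Option Int × Option Int) : Decidable (Spec_find_start_end_indexes string substring out) := by unfold Spec_find_start_end_indexes; infer_instance

-- ===== CLAIM (what is proved, stated in full; the proofs are below) =====
def Claim_equal_find_start_end_indexes : Prop := ∀ (string : String) (substring : String), Dom_find_start_end_indexes string substring → Spec_find_start_end_indexes string substring (find_start_end_indexes string substring)

-- ===== LEMMAS AND PROOFS =====

-- A's fold body, abstracted
def aStep (s t : List Char) (st : Option Int × Option Int) (i : Int) : Option Int × Option Int :=
  if PySem.List.slice s (some i) (some (i + (t.length : Int))) = t then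
    ((if st.1 = none then some i else st.1), some (i + (t.length : Int) - 1))
  else st

lemma foldl_fst (s t : List Char) (l : List Int) (st : Option Int × Option Int) :
    (l.foldl (aStep s t) st).1 = (match st.1 with | some v => some v | none => bFirst s t l) := by
  induction l generalizing st with
  | nil => cases h : st.1 <;> simp [h, bFirst]
  | cons i rest ih =>
    simp only [List.foldl_cons, ih, bFirst, aStep]
    by_cases hm : PySem.List.slice s (some i) (some (i + (t.length : Int))) = t
    · cases h : st.1
      · simp [hm]
      · simp [hm]
    · cases h : st.1
      · simp [hm, h]
      · simp [hm, h]

lemma bLastEnd_append (s t : List Char) (l₁ l₂ : List Int) :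
    bLastEnd s t (l₁ ++ l₂) =
      (match bLastEnd s t l₁ with | some v => some v | none => bLastEnd s t l₂) := by
  induction l₁ with
  | nil => simp [bLastEnd]
  | cons i rest ih =>
    simp only [List.cons_append, bLastEnd]
    by_cases hm : PySem.List.slice s (some i) (some (i + (t.length : Int))) = t
    · simp [hm]
    · simp [hm, ih]

lemma foldl_snd (s t : List Char) (l : List Int) (st : Option Int × Option Int) :
    (l.foldl (aStep s t) st).2 =
      (match bLastEnd s t l.reverse with | some v => some v | none => st.2) := by
  induction l generalizing st with
  | nil => cases h : st.2 <;> simp [bLastEnd, h]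
  | cons i rest ih =>
    simp only [List.foldl_cons, ih, List.reverse_cons, bLastEnd_append]
    cases hr : bLastEnd s t rest.reverse with
    | some v => rfl
    | none =>
      simp only [aStep, bLastEnd]
      by_cases hm : PySem.List.slice s (some i) (some (i + (t.length : Int))) = t
      · simp [hm]
      · simp [hm]

-- ===== VERDICT (by name: the statement is the Claim_ definition above) =====
theorem find_start_end_indexes_spec : Claim_equal_find_start_end_indexes := by
  intro string substring _
  unfold Spec_find_start_end_indexes find_start_end_indexes find_start_end_indexes_alt
  set s := string.toList
  set t := substring.toList
  have hrev : PySem.List.pyRange ((s.length : Int) - 1) (-1) (-1)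
      = (PySem.List.pyRange 0 (s.length : Int) 1).reverse := by
    have := PySem.List.pyRange_neg_one_eq_reverse ((s.length : Int) - 1) (-1)
    simpa using this
  refine Prod.ext ?_ ?_
  · have h := foldl_fst s t (PySem.List.pyRange 0 (s.length : Int) 1) (none, none)
    simpa [aStep] using h
  · have h := foldl_snd s t (PySem.List.pyRange 0 (s.length : Int) 1) (none, none)
    simp only [hrev]
    cases hr : bLastEnd s t (PySem.List.pyRange 0 (s.length : Int) 1).reverse <;>
      simp [hr] at h ⊢ <;> simpa [hr] using h
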